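-- pv_equiv track=rewrite | github.com/Debsen85/Leetcode | 2017.grid-game.py | gridGame
-- ===== SOURCE A (Python) =====
-- from typing import List
--
-- def gridGame(grid: List[List[int]]) -> int:
--     def prefixSum():
--         for num1, num2 in zip(grid[0], grid[1]):
--             prefix1.append(prefix1[-1] + num1)
--             prefix2.append(prefix2[-1] + num2)
--
--     def calculateMaxPathSum():
--         answer = []
--         for index in range(len(grid[0])):
--             answer.append(max(prefix1[-1] - prefix1[index + 1], prefix2[index]))
--         return min(answer)
--
--     prefix1 = [0]
--     prefix2 = [0]
--
--     prefixSum()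
--
--     return calculateMaxPathSum()
-- ===== SOURCE B (Python) =====
-- from typing import List
--
-- def gridGame(grid: List[List[int]]) -> int:
--     # Divide and conquer over the column list: a segment knows the top-row sum
--     # to its right and the bottom-row sum to its left; the best split point of
--     # a segment is the better of its two halves' best split points.
--     cols = list(zip(grid[0], grid[1]))
--
--     def rec(seg, top_right, bot_left):
--         # returns (best split value in seg, top-row sum of seg, bottom-row sum of seg)
--         if len(seg) == 1:
--             a, b = seg[0]
--             return max(top_right, bot_left), a, b
--         mid = len(seg) // 2
--         left, right = seg[:mid], seg[mid:]
--         lbest, ltop, lbot = rec(left, top_right + sum(a for a, _ in right), bot_left)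
--         rbest, rtop, rbot = rec(right, top_right, bot_left + lbot)
--         return min(lbest, rbest), ltop + rtop, lbot + rbot
--
--     best, _, _ = rec(cols, 0, 0)
--     return best
-- ===== Notes on version B (the rewrite author's own statement) =====
-- stated objective: alternative
-- what changed: Replaces A's prefix-sum arrays and candidate list by a divide-and-conquer recursion over the column list: each segment, given the top-row sum to its right and the bottom-row sum to its left, returns the best split value of its two halves together with its own row sums.
import Mathlib
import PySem

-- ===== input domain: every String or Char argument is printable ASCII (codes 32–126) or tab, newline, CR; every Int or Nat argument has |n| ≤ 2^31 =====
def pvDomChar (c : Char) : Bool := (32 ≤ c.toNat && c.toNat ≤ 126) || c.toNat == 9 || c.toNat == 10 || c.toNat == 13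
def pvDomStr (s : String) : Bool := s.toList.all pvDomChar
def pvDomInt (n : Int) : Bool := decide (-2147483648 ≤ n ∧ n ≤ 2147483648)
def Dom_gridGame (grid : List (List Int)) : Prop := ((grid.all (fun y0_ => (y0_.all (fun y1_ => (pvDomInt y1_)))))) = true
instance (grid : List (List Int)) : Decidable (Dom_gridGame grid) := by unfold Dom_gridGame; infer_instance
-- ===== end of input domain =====

-- B replaces A's prefix-sum arrays and candidate list by a divide-and-conquer
-- recursion over the column list (return-value equivalence; similar cost).

-- ===== PORT A =====
-- one iteration of A's prefixSum loop: append running sums to both prefix lists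
def pvStepA (p : List Int × List Int) (nm : Int × Int) : List Int × List Int :=
  (p.1 ++ [((PySem.List.pyGet? p.1 (-1)).getD 0) + nm.1],
   p.2 ++ [((PySem.List.pyGet? p.2 (-1)).getD 0) + nm.2])

def gridGame (grid : List (List Int)) : Int :=
  let row0 := (PySem.List.pyGet? grid 0).getD []
  let row1 := (PySem.List.pyGet? grid 1).getD []
  let p := (row0.zip row1).foldl pvStepA ([0], [0])
  let answer := (PySem.List.pyRange 0 (row0.length : Int) 1).map (fun i =>
    max (((PySem.List.pyGet? p.1 (-1)).getD 0) - ((PySem.List.pyGet? p.1 (i + 1)).getD 0))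
        ((PySem.List.pyGet? p.2 i).getD 0))
  (PySem.List.min? answer (fun x => x)).getD 0

-- ===== PORT B =====
-- B's rec(seg, top_right, bot_left): (best split value, top-row sum, bottom-row sum).
-- Python's slices seg[:mid] / seg[mid:] with 0 ≤ mid ≤ len(seg) are exactly take/drop.
-- The [] case returns junk: there Python B recurses forever (RecursionError),
-- which is unreachable from any input satisfying Pre_.
def pvRecB (seg : List (Int × Int)) (tR bL : Int) : Int × Int × Int :=
  if seg.length = 1 then
    match seg with
    | (a, b) :: _ => (max tR bL, a, b)
    | [] => (0, 0, 0)
  else if seg.length = 0 then (0, 0, 0)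
  else
    let mid := seg.length / 2
    let l := pvRecB (seg.take mid) (tR + (((seg.drop mid).map Prod.fst).sum)) bL
    let r := pvRecB (seg.drop mid) tR (bL + l.2.2)
    (min l.1 r.1, l.2.1 + r.2.1, l.2.2 + r.2.2)
termination_by seg.length
decreasing_by
  · simp only [List.length_take]; omega
  · simp only [List.length_drop]; omega

def gridGame_alt (grid : List (List Int)) : Int :=
  let row0 := (PySem.List.pyGet? grid 0).getD []
  let row1 := (PySem.List.pyGet? grid 1).getD []
  (pvRecB (row0.zip row1) 0 0).1

-- ===== PRECONDITION & SPEC =====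
-- Pre_ excludes exactly the inputs where A raises: fewer than two rows (IndexError on
-- grid[1]), an empty first row (ValueError from taking the min of an empty answer list),
-- or a second row shorter than the first (IndexError past the zip-truncated prefix list).
def Pre_gridGame (grid : List (List Int)) : Prop :=
  2 ≤ grid.length ∧ grid.getD 0 [] ≠ [] ∧ (grid.getD 0 []).length ≤ (grid.getD 1 []).length
instance (grid : List (List Int)) : Decidable (Pre_gridGame grid) := by
  unfold Pre_gridGame; infer_instance

def pvWitness_gridGame : List (List Int) := [[2, 5, 4], [1, 5, 1]]

def Spec_gridGame (grid : List (List Int)) (out : Int) : Prop := out = gridGame_alt grid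
instance (grid : List (List Int)) (out : Int) : Decidable (Spec_gridGame grid out) := by
  unfold Spec_gridGame; infer_instance

-- ===== CLAIM (what is proved, stated in full; the proofs are below) =====
def Claim_equal_gridGame : Prop :=
  ∀ (grid : List (List Int)), Dom_gridGame grid → Pre_gridGame grid →
    Spec_gridGame grid (gridGame grid)

-- ===== LEMMAS AND PROOFS =====

-- the list of candidate values A minimizes, written as a left-to-right recursion
def pvVals (top bottom : Int) : List (Int × Int) → List Int
  | [] => []
  | (a, b) :: t => max (top - a) bottom :: pvVals (top - a) (bottom + b) t

-- the same candidates, parameterized the way B's recursion sees them: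
-- tR = top-row sum to the right of the whole list, bL = bottom-row sum to its left
def pvCands : List (Int × Int) → Int → Int → List Int
  | [], _, _ => []
  | (_, b) :: t, tR, bL => max (tR + (t.map Prod.fst).sum) bL :: pvCands t tR (bL + b)

-- min of a nonempty list, as A's min() computes it
def pvMinL : List Int → Int
  | [] => 0
  | v :: t => t.foldl min v

-- running prefix sums continuing from c
def pvScan (c : Int) : List Int → List Int
  | [] => []
  | x :: t => (c + x) :: pvScan (c + x) t

theorem pvScan_last (xs : List Int) (c : Int) :
    (c :: pvScan c xs).getLast? = some (c + xs.sum) := by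
  induction xs generalizing c with
  | nil => simp [pvScan]
  | cons x t ih => simpa [pvScan, add_assoc] using ih (c + x)

theorem pvScan_get (xs : List Int) (c : Int) (k : Nat) (hk : k < xs.length) :
    (pvScan c xs)[k]? = some (c + (xs.take (k + 1)).sum) := by
  induction xs generalizing c k with
  | nil => simp at hk
  | cons x t ih =>
    cases k with
    | zero => simp [pvScan]
    | succ k =>
      have := ih (c + x) k (by simpa using hk)
      simpa [pvScan, add_assoc] using this

-- prefix characterization of A's foldl
theorem pvFoldA (zs : List (Int × Int)) :
    ∀ (l1 l2 : List Int) (c1 c2 : Int),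
    zs.foldl pvStepA (l1 ++ [c1], l2 ++ [c2]) =
      (l1 ++ [c1] ++ pvScan c1 (zs.map Prod.fst),
       l2 ++ [c2] ++ pvScan c2 (zs.map Prod.snd)) := by
  induction zs with
  | nil => intro l1 l2 c1 c2; simp [pvScan]
  | cons z t ih =>
    intro l1 l2 c1 c2
    have hstep : pvStepA (l1 ++ [c1], l2 ++ [c2]) z =
        ((l1 ++ [c1]) ++ [c1 + z.1], (l2 ++ [c2]) ++ [c2 + z.2]) := by
      simp [pvStepA, PySem.List.pyGet?_neg_one_append_singleton]
    simp only [List.foldl_cons, hstep, ih (l1 ++ [c1]) (l2 ++ [c2]) (c1 + z.1) (c2 + z.2)]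
    cases z with
    | mk a b => simp [pvScan, List.append_assoc]

-- pvVals written as a map over range
theorem pvVals_eq_map (zs : List (Int × Int)) :
    ∀ (top bottom : Int),
    pvVals top bottom zs = (List.range zs.length).map (fun j =>
      max (top - ((zs.map Prod.fst).take (j + 1)).sum)
          (bottom + ((zs.map Prod.snd).take j).sum)) := by
  induction zs with
  | nil => intro top bottom; simp [pvVals]
  | cons z t ih =>
    intro top bottom
    cases z with
    | mk a b =>
      simp only [pvVals, List.length_cons, List.range_succ_eq_map, List.map_cons,
        List.map_map, ih (top - a) (bottom + b)]
      congr 1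
      · simp
      · apply List.map_congr_left
        intro j _
        simp [List.take_succ_cons, Function.comp, add_assoc, sub_sub]

-- pvVals is pvCands with the parameters shifted
theorem pvVals_eq_cands (zs : List (Int × Int)) :
    ∀ (top bottom : Int),
    pvVals top bottom zs = pvCands zs (top - (zs.map Prod.fst).sum) bottom := by
  induction zs with
  | nil => intro top bottom; simp [pvVals, pvCands]
  | cons z t ih =>
    intro top bottom
    cases z with
    | mk a b =>
      simp only [pvVals, pvCands, ih (top - a) (bottom + b), List.map_cons, List.sum_cons]
      ring_nf

theorem pvCands_length (zs : List (Int × Int)) :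
    ∀ tR bL, (pvCands zs tR bL).length = zs.length := by
  induction zs with
  | nil => intro tR bL; simp [pvCands]
  | cons z t ih =>
    intro tR bL
    cases z with
    | mk a b => simp [pvCands, ih]

-- candidates of a concatenation split into candidates of the halves
theorem pvCands_append (l r : List (Int × Int)) :
    ∀ (tR bL : Int),
    pvCands (l ++ r) tR bL =
      pvCands l (tR + ((r.map Prod.fst).sum)) bL ++
      pvCands r tR (bL + ((l.map Prod.snd).sum)) := by
  induction l with
  | nil => intro tR bL; simp [pvCands]
  | cons z t ih =>
    intro tR bL
    cases z with
    | mk a b =>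
      simp only [List.cons_append, pvCands, ih tR (bL + b), List.map_cons, List.map_append,
        List.sum_cons, List.sum_append]
      ring_nf

theorem pvFoldl_min_min (t : List Int) :
    ∀ (x y : Int), t.foldl min (min x y) = min x (t.foldl min y) := by
  induction t with
  | nil => intro x y; simp
  | cons z s ih =>
    intro x y
    simp only [List.foldl_cons]
    rw [min_assoc, ih]

theorem pvMinL_append (l r : List Int) (hl : l ≠ []) (hr : r ≠ []) :
    pvMinL (l ++ r) = min (pvMinL l) (pvMinL r) := by
  match l, hl with
  | v :: t, _ =>
    match r, hr with
    | w :: s, _ =>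
      simp only [pvMinL, List.cons_append, List.foldl_append, List.foldl_cons]
      rw [pvFoldl_min_min]

-- B's divide-and-conquer recursion computes the minimum candidate and the row sums
theorem pvRecB_spec (n : Nat) :
    ∀ (seg : List (Int × Int)) (tR bL : Int), seg.length ≤ n → seg ≠ [] →
    pvRecB seg tR bL =
      (pvMinL (pvCands seg tR bL), (seg.map Prod.fst).sum, (seg.map Prod.snd).sum) := by
  induction n with
  | zero =>
    intro seg tR bL hle hne
    cases seg with
    | nil => exact absurd rfl hne
    | cons z t => simp at hle
  | succ n ih =>
    intro seg tR bL hle hne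
    rw [pvRecB.eq_def]
    by_cases h1 : seg.length = 1
    · match seg, h1 with
      | [(a, b)], _ => simp [pvCands, pvMinL]
    · have h0 : seg.length ≠ 0 := by
        intro h; exact hne (List.eq_nil_of_length_eq_zero h)
      simp only [h1, h0, if_false]
      have hlen2 : 2 ≤ seg.length := by omega
      set mid := seg.length / 2 with hmid
      have hmid1 : 1 ≤ mid := by omega
      have hmidlt : mid < seg.length := by omega
      have htlen : (seg.take mid).length = mid := by
        simp [List.length_take]; omega
      have hdlen : (seg.drop mid).length = seg.length - mid := by
        simp [List.length_drop]
      have htne : seg.take mid ≠ [] := by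
        intro h; rw [h] at htlen; simp at htlen; omega
      have hdne : seg.drop mid ≠ [] := by
        intro h; rw [h] at hdlen; simp at hdlen; omega
      rw [ih (seg.take mid) _ _ (by omega) htne, ih (seg.drop mid) _ _ (by omega) hdne]
      have hsplit : seg = seg.take mid ++ seg.drop mid := (List.take_append_drop mid seg).symm
      have hcands := pvCands_append (seg.take mid) (seg.drop mid) tR bL
      simp only
      rw [Prod.mk.injEq, Prod.mk.injEq]
      refine ⟨?_, ?_, ?_⟩
      · rw [show pvCands seg tR bL = pvCands (seg.take mid ++ seg.drop mid) tR bL from by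
          rw [← hsplit]]
        rw [hcands, pvMinL_append]
        · intro h
          have := pvCands_length (seg.take mid) (tR + ((seg.drop mid).map Prod.fst).sum) bL
          rw [h] at this; simp at this; omega
        · intro h
          have := pvCands_length (seg.drop mid) tR (bL + ((seg.take mid).map Prod.snd).sum)
          rw [h] at this; simp at this; omega
      · conv_rhs => rw [hsplit]
        simp
      · conv_rhs => rw [hsplit]
        simp

-- ===== VERDICT (by name: the statement is the Claim_ definition above) =====
theorem gridGame_spec : Claim_equal_gridGame := by
  intro grid _hdom hpre
  obtain ⟨hlen, hne, hle⟩ := hpre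
  match grid, hlen with
  | r0 :: r1 :: rest, _ =>
  simp only [List.getD, List.getElem?_cons_zero, List.getElem?_cons_succ, Option.getD_some] at hne hle
  unfold Spec_gridGame gridGame gridGame_alt
  have hget0 : PySem.List.pyGet? (r0 :: r1 :: rest) 0 = some r0 := by
    simp [PySem.List.pyGet?_zero]
  have hget1 : PySem.List.pyGet? (r0 :: r1 :: rest) 1 = some r1 := by
    rw [show (1 : Int) = ((1 : Nat) : Int) by norm_num, PySem.List.pyGet?_natCast]
    simp
  simp only [hget0, hget1, Option.getD_some]
  set zs := r0.zip r1 with hzs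
  have hxs : zs.map Prod.fst = r0 := List.map_fst_zip hle
  have hn : zs.length = r0.length := by
    simp [hzs, List.length_zip]; omega
  have hyslen : (zs.map Prod.snd).length = r0.length := by simp [hn]
  -- A's prefix lists
  have hfold := pvFoldA zs [] [] 0 0
  simp only [List.nil_append] at hfold
  rw [hfold]
  -- A's answer list equals pvVals r0.sum 0 zs
  have hanswer :
      (PySem.List.pyRange 0 (r0.length : Int) 1).map (fun i =>
        max ((PySem.List.pyGet? ([0] ++ pvScan 0 (zs.map Prod.fst)) (-1)).getD 0 -
              (PySem.List.pyGet? ([0] ++ pvScan 0 (zs.map Prod.fst)) (i + 1)).getD 0)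
            ((PySem.List.pyGet? ([0] ++ pvScan 0 (zs.map Prod.snd)) i).getD 0)) =
        pvVals r0.sum 0 zs := by
    rw [PySem.List.pyRange_zero_natCast, pvVals_eq_map, hn]
    simp only [List.map_map]
    apply List.map_congr_left
    intro j hj
    have hj' : j < r0.length := List.mem_range.mp hj
    have hlast : PySem.List.pyGet? ((0 : Int) :: pvScan 0 r0) (-1) =
        some (0 + r0.sum) := by
      rw [PySem.List.pyGet?_neg_one, pvScan_last]
    have hidx1 : PySem.List.pyGet? ((0 : Int) :: pvScan 0 r0) ((j : Int) + 1) =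
        some (0 + (r0.take (j + 1)).sum) := by
      rw [show ((j : Int) + 1) = ((j + 1 : Nat) : Int) by push_cast; ring,
        PySem.List.pyGet?_natCast]
      simp only [List.getElem?_cons_succ]
      exact pvScan_get _ 0 j (by omega)
    have hidx2 : PySem.List.pyGet? ((0 : Int) :: pvScan 0 (zs.map Prod.snd)) (j : Int) =
        some (((zs.map Prod.snd).take j).sum) := by
      rw [PySem.List.pyGet?_natCast]
      cases j with
      | zero => simp
      | succ k =>
        simp only [List.getElem?_cons_succ]
        rw [pvScan_get _ 0 k (by omega)]
        simp
    simp only [List.singleton_append, Function.comp, hlast, hidx1, hidx2, Option.getD_some,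
      zero_add, hxs]
  rw [hanswer]
  -- B's recursion computes the minimum of the same candidates
  have hzne : zs ≠ [] := by
    intro h
    rw [h] at hn
    exact hne (List.eq_nil_of_length_eq_zero (by simpa using hn.symm))
  rw [pvRecB_spec zs.length zs 0 0 le_rfl hzne]
  have hcv : pvVals r0.sum 0 zs = pvCands zs 0 0 := by
    rw [pvVals_eq_cands, hxs]
    simp
  rw [hcv]
  cases hv : pvCands zs 0 0 with
  | nil =>
    have := pvCands_length zs 0 0
    rw [hv] at this
    simp at this
    exact absurd (List.eq_nil_of_length_eq_zero (by omega)) hne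
  | cons v t =>
    rw [PySem.List.min?_id_cons]
    simp [pvMinL]
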